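-- pv_equiv track=rewrite | github.com/ESIEE-Python/06-syracuse-Arnaud-Pochic | main.py | temps_de_vol_en_altitude
-- ===== SOURCE A (Python) =====
-- def temps_de_vol_en_altitude(l):
--     """Retourne le temps de vol en altitude d'une suite de Syracuse
--
--     Args:
--         l (list): la suite de Syracuse
--
--     Returns:
--         int: le temps de vol en altitude
--     """
--
--     # votre code ici
--
--     n = 1
--     initial = l[0]
--     a = True
--     for i in l:
--         if initial > i:
--             a = False
--         if (initial < i and a is True):
--             n = n+1
--     return n
-- ===== SOURCE B (Python) =====
-- def temps_de_vol_en_altitude(l):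
--     """Two-phase: build the in-altitude prefix, then tally strict climbs."""
--     initial = l[0]
--     prefix = []
--     for x in l:
--         if x < initial:
--             break
--         prefix.append(x)
--     return 1 + sum(1 for x in prefix if x > initial)
-- ===== Notes on version B (the rewrite author's own statement) =====
-- stated objective: simpler
-- what changed: Replaces the latching boolean flag and full-list loop with a two-phase decomposition: build the prefix of elements not below the first element (stopping at the first drop), then return 1 plus the count of prefix elements strictly above the first element.
import Mathlib
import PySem

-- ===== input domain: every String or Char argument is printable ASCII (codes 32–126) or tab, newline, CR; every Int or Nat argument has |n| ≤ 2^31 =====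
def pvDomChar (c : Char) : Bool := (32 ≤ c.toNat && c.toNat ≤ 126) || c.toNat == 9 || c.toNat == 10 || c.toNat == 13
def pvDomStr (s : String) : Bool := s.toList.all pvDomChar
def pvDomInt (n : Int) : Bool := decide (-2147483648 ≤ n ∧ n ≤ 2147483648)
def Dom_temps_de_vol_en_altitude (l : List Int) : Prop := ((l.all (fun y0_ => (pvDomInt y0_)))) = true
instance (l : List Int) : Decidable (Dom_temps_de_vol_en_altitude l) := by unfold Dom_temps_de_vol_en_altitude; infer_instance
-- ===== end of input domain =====

-- B replaces A's latching boolean flag over the whole list by a two-phase build-prefix-then-tally decomposition (objective: simpler).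


-- ===== PORT A =====
-- one loop iteration of A: first if sets the flag, second if counts
def pvStepA (initial : Int) (s : Int × Bool) (i : Int) : Int × Bool :=
  let s := if initial > i then (s.1, false) else s
  if initial < i ∧ s.2 = true then (s.1 + 1, s.2) else s

def temps_de_vol_en_altitude (l : List Int) : Int :=
  match l with
  | [] => 0  -- indexing the first element raises IndexError in Python; excluded by Pre_
  | initial :: _ => (l.foldl (pvStepA initial) (1, true)).1

-- ===== PORT B =====
-- phase 1 of B: the in-altitude prefix (loop with break at the first x < initial)
def pvAltPrefix (initial : Int) : List Int → List Int
  | [] => []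
  | x :: xs => if x < initial then [] else x :: pvAltPrefix initial xs

def temps_de_vol_en_altitude_alt (l : List Int) : Int :=
  match l with
  | [] => 0  -- indexing the first element raises IndexError in Python; excluded by Pre_
  | initial :: _ =>
    -- phase 2: tally the strict climbs in the prefix
    1 + ((pvAltPrefix initial l).countP (fun x => decide (x > initial)) : Int)

-- ===== PRECONDITION & SPEC =====
-- A reads the first element, which raises IndexError on the empty list.
def Pre_temps_de_vol_en_altitude (l : List Int) : Prop := l ≠ []
instance (l : List Int) : Decidable (Pre_temps_de_vol_en_altitude l) := by unfold Pre_temps_de_vol_en_altitude; infer_instance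
def pvWitness_temps_de_vol_en_altitude : List Int := [5, 16, 8, 4]

def Spec_temps_de_vol_en_altitude (l : List Int) (out : Int) : Prop := out = temps_de_vol_en_altitude_alt l
instance (l : List Int) (out : Int) : Decidable (Spec_temps_de_vol_en_altitude l out) := by unfold Spec_temps_de_vol_en_altitude; infer_instance

-- ===== CLAIM (what is proved, stated in full; the proofs are below) =====
def Claim_equal_temps_de_vol_en_altitude : Prop := ∀ (l : List Int), Dom_temps_de_vol_en_altitude l → Pre_temps_de_vol_en_altitude l → Spec_temps_de_vol_en_altitude l (temps_de_vol_en_altitude l)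

-- ===== LEMMAS AND PROOFS =====
-- once the flag is False, A's loop never changes the state
lemma foldA_false (initial n : Int) (l : List Int) :
    l.foldl (pvStepA initial) (n, false) = (n, false) := by
  induction l with
  | nil => rfl
  | cons x xs ih =>
    simp only [List.foldl_cons, pvStepA]
    split_ifs with h1 h2 h2 <;> simp_all

-- with the flag True, A's loop computes n plus the strict climbs of the in-altitude prefix
lemma foldA_true (initial : Int) (l : List Int) : ∀ n : Int,
    (l.foldl (pvStepA initial) (n, true)).1
      = n + ((pvAltPrefix initial l).countP (fun x => decide (x > initial)) : Int) := by
  induction l with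
  | nil => intro n; simp [pvAltPrefix]
  | cons x xs ih =>
    intro n
    rcases lt_trichotomy x initial with h | h | h
    · have hs : pvStepA initial (n, true) x = (n, false) := by
        simp [pvStepA, h, show ¬ initial < x by omega]
      simp [hs, foldA_false, pvAltPrefix, h]
    · have hs : pvStepA initial (n, true) x = (n, true) := by
        simp [pvStepA, show ¬ initial > x by omega, show ¬ initial < x by omega]
      have hp : pvAltPrefix initial (x :: xs) = x :: pvAltPrefix initial xs := by
        simp [pvAltPrefix, show ¬ x < initial by omega]
      simp [hs, ih, hp, show ¬ x > initial by omega]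
    · have hs : pvStepA initial (n, true) x = (n + 1, true) := by
        simp [pvStepA, h, show ¬ initial > x by omega]
      have hp : pvAltPrefix initial (x :: xs) = x :: pvAltPrefix initial xs := by
        simp [pvAltPrefix, show ¬ x < initial by omega]
      simp [hs, ih, hp, h]
      push_cast
      ring

-- ===== VERDICT (by name: the statement is the Claim_ definition above) =====
theorem temps_de_vol_en_altitude_spec : Claim_equal_temps_de_vol_en_altitude := by
  intro l _ hpre
  match l with
  | [] => exact absurd rfl hpre
  | initial :: rest =>
    show temps_de_vol_en_altitude _ = temps_de_vol_en_altitude_alt _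
    simp only [temps_de_vol_en_altitude, temps_de_vol_en_altitude_alt]
    rw [foldA_true]
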